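-- pv_equiv track=rewrite | github.com/Sergey-Strelin/Python | 020. Task20/Task20.py | slovar
-- ===== SOURCE A (Python) =====
-- def slovar(mn):
--     mn_slovar ={}
--     for el in mn:
--         if '*x^' in el:
--             tt = el.split('*x^')
--             if tt[0] == '':
--                 mn_slovar[f'{tt[1]}'] = '1'
--             else:
--                 mn_slovar[f'{tt[1]}'] = f'{tt[0]}'
--         elif 'x^' in el:
--             tt = el.split('x^')
--             if tt[0] == '':
--                 mn_slovar[f'{tt[1]}'] = '1'
--             else:
--                 mn_slovar[f'{tt[1]}'] = f'{tt[0]}'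
--         elif '*x' in el:
--             tt = el.split('*x')
--             if tt[1] == '': tt[1] = 1
--             if tt[0] == '':
--                 mn_slovar[f'{tt[1]}'] = '1'
--             else:
--                 mn_slovar[f'{tt[1]}'] = f'{tt[0]}'
--         elif 'x' in el:
--             tt = el.split('x')
--             if tt[1] == '': tt[1] = 1
--             if tt[0] == '':
--                 mn_slovar[f'{tt[1]}'] = '1'
--             else:
--                 mn_slovar[f'{tt[1]}'] = f'{tt[0]}'
--         else:
--             tt = (el, '^0')
--             mn_slovar[f'{0}'] = f'{tt[0]}'
--
--     return mn_slovar
-- ===== SOURCE B (Python) =====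
-- # Parses each term by locating its single 'x' and slicing around it, instead of
-- # a four-way separator/split cascade (objective: simpler).
--
-- def slovar(mn):
--     d = {}
--     for el in mn:
--         i = el.find('x')
--         if i < 0:
--             d['0'] = el
--         else:
--             coeff = el[:i]
--             if coeff.endswith('*'):
--                 coeff = coeff[:-1]
--             exp = el[i + 1:]
--             if exp.startswith('^'):
--                 exp = exp[1:]
--             elif exp == '':
--                 exp = '1'
--             d[exp] = coeff or '1'
--     return d
-- ===== Notes on version B (the rewrite author's own statement) =====
-- stated objective: simpler
-- what changed: B locates the term's single 'x' with one find and slices coefficient/exponent around it (stripping a trailing '*' and a leading '^'), replacing A's four-way marker-membership/split cascade; Pre_ excludes terms containing more than one 'x', where A's value (the slice between the first and second occurrence of whichever marker matched) is an accident of str.split and B's first-x parse is an equally arbitrary read of a malformed term.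
-- outside the precondition, e.g. on slovar(['x^2*x^3']): A returns {'3': 'x^2'}, B returns {'2*x^3': '1'}; on slovar(['2x3x4']): A returns {'3': '2'}, B returns {'3x4': '2'}
import Mathlib
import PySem

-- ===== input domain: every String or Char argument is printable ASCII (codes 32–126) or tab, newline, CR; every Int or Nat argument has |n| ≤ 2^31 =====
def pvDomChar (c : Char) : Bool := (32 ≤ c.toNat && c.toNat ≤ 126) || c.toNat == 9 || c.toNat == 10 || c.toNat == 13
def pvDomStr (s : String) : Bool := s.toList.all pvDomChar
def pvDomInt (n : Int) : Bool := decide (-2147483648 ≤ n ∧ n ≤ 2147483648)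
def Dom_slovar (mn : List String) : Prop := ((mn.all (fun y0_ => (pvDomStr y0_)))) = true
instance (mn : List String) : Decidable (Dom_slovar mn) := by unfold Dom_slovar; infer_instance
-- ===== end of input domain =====

-- B parses each term by locating its single 'x' and slicing around it instead of
-- A's four-way separator/split cascade (objective: simpler).

-- ===== PORT A =====
def slovarStep (d : PySem.Dict String String) (el : String) : PySem.Dict String String :=
  if PySem.Str.isIn "*x^" el = true then
    let tt := (PySem.Str.split? el "*x^").getD []
    if PySem.List.pyGetD tt 0 "" = "" then
      d.insert (PySem.List.pyGetD tt 1 "") "1"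
    else
      d.insert (PySem.List.pyGetD tt 1 "") (PySem.List.pyGetD tt 0 "")
  else if PySem.Str.isIn "x^" el = true then
    let tt := (PySem.Str.split? el "x^").getD []
    if PySem.List.pyGetD tt 0 "" = "" then
      d.insert (PySem.List.pyGetD tt 1 "") "1"
    else
      d.insert (PySem.List.pyGetD tt 1 "") (PySem.List.pyGetD tt 0 "")
  else if PySem.Str.isIn "*x" el = true then
    let tt := (PySem.Str.split? el "*x").getD []
    let t1 := PySem.List.pyGetD tt 1 ""
    let t1 := if t1 = "" then "1" else t1
    if PySem.List.pyGetD tt 0 "" = "" then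
      d.insert t1 "1"
    else
      d.insert t1 (PySem.List.pyGetD tt 0 "")
  else if PySem.Str.isIn "x" el = true then
    let tt := (PySem.Str.split? el "x").getD []
    let t1 := PySem.List.pyGetD tt 1 ""
    let t1 := if t1 = "" then "1" else t1
    if PySem.List.pyGetD tt 0 "" = "" then
      d.insert t1 "1"
    else
      d.insert t1 (PySem.List.pyGetD tt 0 "")
  else
    d.insert "0" el

def slovar (mn : List String) : List (String × String) :=
  (mn.foldl slovarStep PySem.Dict.empty).items

-- ===== PORT B =====
def slovarAltStep (d : PySem.Dict String String) (el : String) : PySem.Dict String String :=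
  let i := PySem.Str.find el "x"
  if i < 0 then
    d.insert "0" el
  else
    let coeff := PySem.Str.slice el none (some i)
    let coeff := if PySem.Str.endswith coeff "*" = true then PySem.Str.slice coeff none (some (-1)) else coeff
    let exp := PySem.Str.slice el (some (i + 1)) none
    let exp := if PySem.Str.startswith exp "^" = true then PySem.Str.slice exp (some 1) none
               else if exp = "" then "1" else exp
    d.insert exp (if coeff = "" then "1" else coeff)

def slovar_alt (mn : List String) : List (String × String) :=
  (mn.foldl slovarAltStep PySem.Dict.empty).items

-- ===== PRECONDITION & SPEC =====
-- Pre_ excludes terms containing more than one 'x': there the string is not a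
-- single polynomial term and A's result (a slice between the first and second
-- occurrence of whichever marker matched, an artefact of str.split) is as
-- accidental as any other; B parses around the first 'x' instead.
def Pre_slovar (mn : List String) : Prop := ∀ el ∈ mn, el.toList.count 'x' ≤ 1
instance (mn : List String) : Decidable (Pre_slovar mn) := by unfold Pre_slovar; infer_instance

def pvWitness_slovar : List String := ["3*x^2", "-x", "x^", "7"]

def Spec_slovar (mn : List String) (out : List (String × String)) : Prop := out = slovar_alt mn
instance (mn : List String) (out : List (String × String)) : Decidable (Spec_slovar mn out) := by unfold Spec_slovar; infer_instance

-- ===== CLAIM (what is proved, stated in full; the proofs are below) =====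
def Claim_equal_slovar : Prop := ∀ (mn : List String), Dom_slovar mn → Pre_slovar mn → Spec_slovar mn (slovar mn)


-- ===== LEMMAS AND PROOFS =====

-- characterisation of PySem.Chars.find / splitOn (machinery specific to this file)
theorem infix_iff_exists_drop (p s : List Char) :
    p <:+: s ↔ ∃ j, p <+: s.drop j := by
  rw [← PySem.Chars.isIn_iff_infix, ← PySem.Chars.exists_prefix_drop_iff_isIn]

theorem find_eq_zero_of_prefix {p s : List Char} (h : p <+: s) :
    PySem.Chars.find s p = 0 := by
  have hnn : 0 ≤ PySem.Chars.find s p := by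
    rw [PySem.Chars.find_nonneg_iff]
    exact h.isInfix
  obtain ⟨-, hmin⟩ := PySem.Chars.find_spec hnn
  by_contra hne
  have h0 : 0 < (PySem.Chars.find s p).toNat := by omega
  exact hmin 0 h0 (by simpa using h)

theorem find_cons_of_not_prefix {p : List Char} (c : Char) (t : List Char)
    (h : ¬ p <+: (c :: t)) :
    PySem.Chars.find (c :: t) p =
      if PySem.Chars.find t p = -1 then -1 else PySem.Chars.find t p + 1 := by
  by_cases ht : PySem.Chars.find t p = -1
  · rw [ht, if_pos rfl]
    rw [PySem.Chars.find_eq_neg_one_iff]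
    intro hinf
    obtain ⟨j, hj⟩ := (infix_iff_exists_drop p (c :: t)).mp hinf
    cases j with
    | zero => exact h (by simpa using hj)
    | succ k =>
      have hk : p <+: t.drop k := by simpa [List.drop_succ_cons] using hj
      exact ((PySem.Chars.find_eq_neg_one_iff _ _).mp ht)
        ((infix_iff_exists_drop p t).mpr ⟨k, hk⟩)
  · rw [if_neg ht]
    have htn : 0 ≤ PySem.Chars.find t p := by
      have := PySem.Chars.neg_one_le_find t p
      omega
    obtain ⟨hpre, hmin⟩ := PySem.Chars.find_spec htn
    set j := (PySem.Chars.find t p).toNat with hjdef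
    have hinf : p <:+: (c :: t) := by
      refine (infix_iff_exists_drop p (c :: t)).mpr ⟨j + 1, ?_⟩
      simpa [List.drop_succ_cons] using hpre
    have hnn : 0 ≤ PySem.Chars.find (c :: t) p := by
      rw [PySem.Chars.find_nonneg_iff]; exact hinf
    obtain ⟨hpre', hmin'⟩ := PySem.Chars.find_spec hnn
    set f := (PySem.Chars.find (c :: t) p).toNat with hfdef
    have hf0 : f ≠ 0 := by
      intro h0
      apply h
      simpa [h0] using hpre'
    have hle : f ≤ j + 1 := by
      by_contra hgt
      exact (hmin' (j + 1) (by omega)) (by simpa [List.drop_succ_cons] using hpre)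
    have hge : j + 1 ≤ f := by
      by_contra hlt
      have hfm : f - 1 < j := by omega
      have hdrop : p <+: t.drop (f - 1) := by
        have hps := hpre'
        have hfs : f = (f - 1) + 1 := by omega
        rw [hfs] at hps
        simpa [List.drop_succ_cons] using hps
      exact (hmin (f - 1) hfm) hdrop
    omega

-- a fuel-indexed, accumulator-free reformulation of PySem.Chars.splitOn.go
def spA (p : List Char) : Nat → List Char → List Char → List (List Char)
  | 0, l, cur => [cur.reverse ++ l]
  | _ + 1, [], cur => [cur.reverse]
  | fuel + 1, c :: rest, cur =>
    if p.isPrefixOf (c :: rest) then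
      cur.reverse :: spA p fuel (List.drop p.length (c :: rest)) []
    else
      spA p fuel rest (c :: cur)

theorem go_eq_spA (p : List Char) :
    ∀ (fuel : Nat) (l cur : List Char) (acc : List (List Char)),
      PySem.Chars.splitOn.go p fuel l cur acc = acc.reverse ++ spA p fuel l cur := by
  intro fuel
  induction fuel with
  | zero => intro l cur acc; simp [PySem.Chars.splitOn.go, spA]
  | succ n ih =>
    intro l cur acc
    cases l with
    | nil => simp [PySem.Chars.splitOn.go, spA]
    | cons c rest =>
      by_cases hpre : p.isPrefixOf (c :: rest)
      · simp [PySem.Chars.splitOn.go, spA, hpre, ih]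
      · simp [PySem.Chars.splitOn.go, spA, hpre, ih]

theorem spA_fuel_irrel (p : List Char) (hp : p ≠ []) :
    ∀ (f1 f2 : Nat) (l cur : List Char), l.length < f1 → l.length < f2 →
      spA p f1 l cur = spA p f2 l cur := by
  have hplen : 0 < p.length := by
    cases p with
    | nil => cases hp rfl
    | cons a t => simp
  intro f1
  induction f1 with
  | zero => intro f2 l cur h1 _; omega
  | succ n ih =>
    intro f2 l cur h1 h2
    cases f2 with
    | zero => omega
    | succ m =>
      cases l with
      | nil => simp [spA]
      | cons c rest =>
        by_cases hpre : p.isPrefixOf (c :: rest)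
        · rw [show spA p (n + 1) (c :: rest) cur =
              cur.reverse :: spA p n (List.drop p.length (c :: rest)) [] from by simp [spA, hpre],
            show spA p (m + 1) (c :: rest) cur =
              cur.reverse :: spA p m (List.drop p.length (c :: rest)) [] from by simp [spA, hpre]]
          congr 1
          exact ih m _ []
            (by simp only [List.length_drop, List.length_cons] at h1 ⊢; omega)
            (by simp only [List.length_drop, List.length_cons] at h2 ⊢; omega)
        · rw [show spA p (n + 1) (c :: rest) cur = spA p n rest (c :: cur) from by simp [spA, hpre],
            show spA p (m + 1) (c :: rest) cur = spA p m rest (c :: cur) from by simp [spA, hpre]]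
          exact ih m rest (c :: cur)
            (by simp only [List.length_cons] at h1; omega)
            (by simp only [List.length_cons] at h2; omega)

theorem spA_char (p : List Char) (hp : p ≠ []) :
    ∀ (fuel : Nat) (l cur : List Char), l.length < fuel →
      spA p fuel l cur =
        if 0 ≤ PySem.Chars.find l p then
          (cur.reverse ++ l.take (PySem.Chars.find l p).toNat) ::
            spA p fuel (l.drop ((PySem.Chars.find l p).toNat + p.length)) []
        else [cur.reverse ++ l] := by
  have hplen : 0 < p.length := by
    cases p with
    | nil => cases hp rfl
    | cons a t => simp
  intro fuel
  induction fuel with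
  | zero => intro l cur h; omega
  | succ n ih =>
    intro l cur h
    cases l with
    | nil =>
      have hfind : PySem.Chars.find [] p = -1 := by
        rw [PySem.Chars.find_eq_neg_one_iff]
        intro hinf
        exact hp (by simpa using hinf)
      rw [hfind]
      norm_num [spA]
    | cons c rest =>
      by_cases hpre : p <+: (c :: rest)
      · have hpreB : p.isPrefixOf (c :: rest) = true := List.isPrefixOf_iff_prefix.mpr hpre
        have hfind : PySem.Chars.find (c :: rest) p = 0 := find_eq_zero_of_prefix hpre
        have hL : spA p (n + 1) (c :: rest) cur =
            cur.reverse :: spA p n (List.drop p.length (c :: rest)) [] := by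
          simp [spA, hpreB]
        rw [hL, hfind, if_pos (le_refl (0 : Int))]
        simp only [Int.toNat_zero, List.take_zero, List.append_nil, Nat.zero_add]
        congr 1
        exact spA_fuel_irrel p hp n (n + 1) _ []
          (by simp only [List.length_drop, List.length_cons] at h ⊢; omega)
          (by simp only [List.length_drop, List.length_cons] at h ⊢; omega)
      · have hpreB : p.isPrefixOf (c :: rest) = false := by
          rw [Bool.eq_false_iff]
          intro hc
          exact hpre (List.isPrefixOf_iff_prefix.mp hc)
        have hstep : spA p (n + 1) (c :: rest) cur = spA p n rest (c :: cur) := by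
          simp [spA, hpreB]
        have hfind := find_cons_of_not_prefix (p := p) c rest hpre
        rw [hstep, ih rest (c :: cur) (by simp only [List.length_cons] at h; omega)]
        by_cases hr : PySem.Chars.find rest p = -1
        · have hr' : ¬ (0 ≤ PySem.Chars.find rest p) := by omega
          have hfind2 : PySem.Chars.find (c :: rest) p = -1 := by rw [hfind, if_pos hr]
          rw [if_neg hr', hfind2, if_neg (by norm_num)]
          simp [List.reverse_cons]
        · have hge : 0 ≤ PySem.Chars.find rest p := by
            have := PySem.Chars.neg_one_le_find rest p
            omega
          have hfind2 : PySem.Chars.find (c :: rest) p = PySem.Chars.find rest p + 1 := by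
            rw [hfind, if_neg hr]
          rw [if_pos hge, hfind2, if_pos (by omega : (0:Int) ≤ PySem.Chars.find rest p + 1)]
          have htn : (PySem.Chars.find rest p + 1).toNat = (PySem.Chars.find rest p).toNat + 1 := by
            omega
          rw [htn, List.take_succ_cons]
          have hidx : (PySem.Chars.find rest p).toNat + 1 + p.length =
              ((PySem.Chars.find rest p).toNat + p.length) + 1 := by omega
          rw [hidx, List.drop_succ_cons]
          congr 1
          · simp [List.reverse_cons]
          · exact spA_fuel_irrel p hp n (n + 1) _ []
              (by simp only [List.length_drop, List.length_cons] at h ⊢; omega)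
              (by simp only [List.length_drop, List.length_cons] at h ⊢; omega)

theorem splitOn_char (p s : List Char) (hp : p ≠ []) :
    PySem.Chars.splitOn s p =
      if 0 ≤ PySem.Chars.find s p then
        s.take (PySem.Chars.find s p).toNat ::
          PySem.Chars.splitOn (s.drop ((PySem.Chars.find s p).toNat + p.length)) p
      else [s] := by
  have hgo : ∀ t : List Char, PySem.Chars.splitOn t p = spA p (t.length + 1) t [] := by
    intro t
    show PySem.Chars.splitOn.go p (t.length + 1) t [] [] = _
    rw [go_eq_spA]
    simp
  rw [hgo s, spA_char p hp (s.length + 1) s [] (by omega)]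
  by_cases h0 : 0 ≤ PySem.Chars.find s p
  · rw [if_pos h0, if_pos h0]
    simp only [List.reverse_nil, List.nil_append]
    congr 1
    rw [hgo]
    exact spA_fuel_irrel p hp (s.length + 1)
      ((s.drop ((PySem.Chars.find s p).toNat + p.length)).length + 1) _ []
      (by simp only [List.length_drop]; omega) (by omega)
  · rw [if_neg h0, if_neg h0]
    simp

-- locating the unique 'x' of a term
theorem prefix_getElem? {p l : List Char} (h : p <+: l) {k : Nat} (hk : k < p.length) :
    l[k]? = p[k]? := by
  obtain ⟨t, rfl⟩ := h
  exact List.getElem?_append_left hk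

theorem getElem_x {u v : List Char} (hu : 'x' ∉ u) (hv : 'x' ∉ v) {j : Nat}
    (h : (u ++ 'x' :: v)[j]? = some 'x') : j = u.length := by
  rcases Nat.lt_trichotomy j u.length with hj | hj | hj
  · exact absurd (List.mem_of_getElem? (by rwa [List.getElem?_append_left hj] at h)) hu
  · exact hj
  · rw [List.getElem?_append_right (le_of_lt hj)] at h
    obtain ⟨k, hk⟩ : ∃ k, j - u.length = k + 1 := ⟨j - u.length - 1, by omega⟩
    rw [hk] at h
    simp only [List.getElem?_cons_succ] at h
    exact absurd (List.mem_of_getElem? h) hv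

theorem occ_pos {u v p : List Char} (hu : 'x' ∉ u) (hv : 'x' ∉ v) {k : Nat}
    (hk : p[k]? = some 'x') {i : Nat} (h : p <+: (u ++ 'x' :: v).drop i) :
    i + k = u.length := by
  have hkl : k < p.length := (List.getElem?_eq_some_iff.mp hk).1
  have h1 : ((u ++ 'x' :: v).drop i)[k]? = some 'x' := by
    rw [prefix_getElem? h hkl]; exact hk
  rw [List.getElem?_drop] at h1
  exact getElem_x hu hv h1

theorem find_at {u v p : List Char} (hu : 'x' ∉ u) (hv : 'x' ∉ v) {k : Nat}
    (hk : p[k]? = some 'x') (hkle : k ≤ u.length)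
    (hpre : p <+: (u ++ 'x' :: v).drop (u.length - k)) :
    PySem.Chars.find (u ++ 'x' :: v) p = ((u.length - k : Nat) : Int) := by
  have hinf : p <:+: (u ++ 'x' :: v) := (infix_iff_exists_drop _ _).mpr ⟨_, hpre⟩
  have h0 : 0 ≤ PySem.Chars.find (u ++ 'x' :: v) p := (PySem.Chars.find_nonneg_iff _ _).mpr hinf
  obtain ⟨hp', -⟩ := PySem.Chars.find_spec h0
  have := occ_pos hu hv hk hp'
  omega

theorem find_absent {u v p : List Char} (hu : 'x' ∉ u) (hv : 'x' ∉ v) {k : Nat}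
    (hk : p[k]? = some 'x')
    (hno : ¬ (k ≤ u.length ∧ p <+: (u ++ 'x' :: v).drop (u.length - k))) :
    PySem.Chars.find (u ++ 'x' :: v) p = -1 := by
  rw [PySem.Chars.find_eq_neg_one_iff]
  intro hinf
  obtain ⟨j, hj⟩ := (infix_iff_exists_drop _ _).mp hinf
  have hjk := occ_pos hu hv hk hj
  refine hno ⟨by omega, ?_⟩
  have : j = u.length - k := by omega
  rwa [this] at hj

theorem find_no_x {p r : List Char} (hxp : 'x' ∈ p) (hr : 'x' ∉ r) :
    PySem.Chars.find r p = -1 :=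
  (PySem.Chars.find_eq_neg_one_iff _ _).mpr (fun hinf => hr (List.IsInfix.mem hxp hinf))

theorem isIn_of_find {el sep : String} {j : Nat}
    (h : PySem.Chars.find el.toList sep.toList = ((j : Nat) : Int)) :
    PySem.Str.isIn sep el = true := by
  rw [PySem.Str.isIn_eq, PySem.Chars.isIn_iff_infix]
  rw [← PySem.Chars.find_nonneg_iff, h]
  exact Int.natCast_nonneg j

theorem isIn_false_of_find {el sep : String}
    (h : PySem.Chars.find el.toList sep.toList = -1) :
    PySem.Str.isIn sep el = false := by
  rw [PySem.Str.isIn_eq]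
  exact (PySem.Chars.isIn_eq_false_iff _ _).mpr ((PySem.Chars.find_eq_neg_one_iff _ _).mp h)

theorem split_pair (el sep : String) (hp : sep.toList ≠ []) (j : Nat)
    (hfind : PySem.Chars.find el.toList sep.toList = ((j : Nat) : Int))
    (hrest : PySem.Chars.find (el.toList.drop (j + sep.toList.length)) sep.toList = -1) :
    (PySem.Str.split? el sep).getD [] =
      [String.ofList (el.toList.take j),
       String.ofList (el.toList.drop (j + sep.toList.length))] := by
  have htt : (PySem.Str.split? el sep).getD [] =
      (PySem.Chars.splitOn el.toList sep.toList).map String.ofList := by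
    simp [PySem.Str.split?, PySem.Chars.split?, hp]
  rw [htt, splitOn_char sep.toList el.toList hp, hfind,
    if_pos (Int.natCast_nonneg j), splitOn_char sep.toList _ hp]
  simp only [Int.toNat_natCast] at *
  rw [hrest, if_neg (by norm_num)]
  simp

theorem ofList_eq_empty_iff (w : List Char) : String.ofList w = "" ↔ w = [] := by
  rw [← String.toList_inj]; simp

theorem suffix_of_getElem_last {u : List Char} {c : Char} (hne : u ≠ [])
    (h : u[u.length - 1]? = some c) : [c] <:+ u := by
  obtain ⟨hlt, heq⟩ := List.getElem?_eq_some_iff.mp h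
  refine ⟨u.dropLast, ?_⟩
  have hl : u.getLast hne = c := by rw [List.getLast_eq_getElem]; exact heq
  rw [← hl]
  exact List.dropLast_append_getLast hne

theorem prefix_of_getElem_zero {v : List Char} {c : Char} (h : v[0]? = some c) :
    [c] <+: v := by
  cases v with
  | nil => simp at h
  | cons a t =>
    simp only [List.getElem?_cons_zero, Option.some.injEq] at h
    exact ⟨t, by rw [h]; rfl⟩


theorem char_at_of_prefix {u v p : List Char} {m k : Nat} {c : Char} (hk : p[k]? = some c)
    (h : p <+: (u ++ 'x' :: v).drop m) : (u ++ 'x' :: v)[m + k]? = some c := by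
  have hkl := (List.getElem?_eq_some_iff.mp hk).1
  rw [← List.getElem?_drop, prefix_getElem? h hkl]
  exact hk

theorem star_of_char {u v : List Char} (h1 : 1 ≤ u.length)
    (h : (u ++ 'x' :: v)[u.length - 1]? = some '*') : ['*'] <:+ u := by
  rw [List.getElem?_append_left (by omega)] at h
  exact suffix_of_getElem_last (fun he => by subst he; simp at h1) h

theorem caret_of_char {u v : List Char} (h : (u ++ 'x' :: v)[u.length + 1]? = some '^') :
    ['^'] <+: v := by
  rw [List.getElem?_append_right (by omega)] at h
  rw [show u.length + 1 - u.length = 1 by omega] at h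
  simp only [List.getElem?_cons_succ] at h
  exact prefix_of_getElem_zero h

theorem count_one_decomp {s : List Char} (h : s.count 'x' = 1) :
    ∃ u v, s = u ++ 'x' :: v ∧ 'x' ∉ u ∧ 'x' ∉ v := by
  induction s with
  | nil => simp at h
  | cons a t ih =>
    by_cases ha : a = 'x'
    · subst ha
      rw [List.count_cons_self] at h
      exact ⟨[], t, rfl, by simp, List.count_eq_zero.mp (by omega)⟩
    · have ht : t.count 'x' = 1 := by simpa [List.count_cons, ha] using h
      obtain ⟨u, v, rfl, hu, hv⟩ := ih ht
      exact ⟨a :: u, v, rfl, by simp [hu]; exact fun he => ha he.symm, hv⟩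

theorem aStep_noX (d : PySem.Dict String String) (el : String) (hx : 'x' ∉ el.toList) :
    slovarStep d el = d.insert "0" el := by
  have hmk : ∀ sub : List Char, 'x' ∈ sub → PySem.Chars.isIn sub el.toList = false := by
    intro sub hm
    exact (PySem.Chars.isIn_eq_false_iff _ _).mpr (fun hinf => hx (List.IsInfix.mem hm hinf))
  simp [slovarStep, hmk ['*', 'x', '^'] (by decide), hmk ['x', '^'] (by decide),
    hmk ['*', 'x'] (by decide), hmk ['x'] (by decide)]

theorem bStep_noX (d : PySem.Dict String String) (el : String) (hx : 'x' ∉ el.toList) :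
    slovarAltStep d el = d.insert "0" el := by
  have hf : PySem.Str.find el "x" = -1 := by
    rw [PySem.Str.find_eq]
    exact find_no_x (by decide) hx
  simp only [slovarAltStep, hf]
  norm_num

theorem aStep_decomp (d : PySem.Dict String String) (el : String) (u v : List Char)
    (hs : el.toList = u ++ 'x' :: v) (hu : 'x' ∉ u) (hv : 'x' ∉ v) :
    slovarStep d el =
      d.insert
        (if ['^'] <+: v then String.ofList v.tail else if v = [] then "1" else String.ofList v)
        (if (if ['*'] <:+ u then u.dropLast else u) = [] then "1"
         else String.ofList (if ['*'] <:+ u then u.dropLast else u)) := by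
  have hget0 : ∀ a b : String, PySem.List.pyGetD [a, b] 0 "" = a := by
    intro a b; simp [pysem]
  have hget1 : ∀ a b : String, PySem.List.pyGetD [a, b] 1 "" = b := by
    intro a b; simp [pysem]
  by_cases hcar : ['^'] <+: v
  · by_cases hstar : ['*'] <:+ u
    · -- '*x^' branch
      obtain ⟨u0, rfl⟩ := hstar
      obtain ⟨v0, rfl⟩ := hcar
      simp only [List.singleton_append] at hs hv ⊢
      have harr : (u0 ++ ['*']) ++ 'x' :: '^' :: v0 = u0 ++ '*' :: 'x' :: '^' :: v0 := by simp
      have hv0 : 'x' ∉ v0 := fun h => hv (by simp [h])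
      have htake : el.toList.take u0.length = u0 := by rw [hs, harr]; exact List.take_left
      have hdrop : el.toList.drop (u0.length + 3) = v0 := by
        rw [hs, harr, List.drop_length_add_append]; simp
      have hf1 : PySem.Chars.find el.toList ['*', 'x', '^'] = ((u0.length : Nat) : Int) := by
        rw [hs]
        have hres := find_at (u := u0 ++ ['*']) (v := '^' :: v0) (p := ['*', 'x', '^'])
          hu hv (k := 1) (by decide) (by simp)
          (by rw [show (u0 ++ ['*']).length - 1 = u0.length by simp, harr, List.drop_left]
              exact ⟨v0, rfl⟩)
        rw [hres]
        simp
      have hin1 : PySem.Str.isIn "*x^" el = true := isIn_of_find hf1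
      have hsp := split_pair el "*x^" (by decide) u0.length hf1
        (by rw [show ("*x^" : String).toList.length = 3 from rfl, hdrop]
            exact find_no_x (by decide) hv0)
      rw [show ("*x^" : String).toList.length = 3 from rfl, htake, hdrop] at hsp
      simp only [slovarStep, hin1, hsp, hget0, hget1, if_true]
      rw [if_pos (List.suffix_append u0 ['*']), if_pos (List.prefix_iff_eq_take.mpr rfl : ['^'] <+: '^' :: v0),
        List.dropLast_concat, List.tail_cons]
      by_cases h0 : u0 = []
      · subst h0; simp
      · rw [if_neg (mt (ofList_eq_empty_iff u0).mp h0), if_neg h0]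
    · -- 'x^' branch
      obtain ⟨v0, rfl⟩ := hcar
      simp only [List.singleton_append] at hs hv ⊢
      have hv0 : 'x' ∉ v0 := fun h => hv (by simp [h])
      have htake : el.toList.take u.length = u := by rw [hs]; exact List.take_left
      have hdrop : el.toList.drop (u.length + 2) = v0 := by
        rw [hs, List.drop_length_add_append]; simp
      have hab1 : PySem.Chars.find el.toList ['*', 'x', '^'] = -1 := by
        rw [hs]
        apply find_absent hu hv (k := 1) (by decide)
        rintro ⟨h1, hp⟩
        have hc := char_at_of_prefix (k := 0) (c := '*') (by decide) hp
        rw [Nat.add_zero] at hc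
        exact hstar (star_of_char h1 hc)
      have hin1 : PySem.Str.isIn "*x^" el = false := isIn_false_of_find hab1
      have hf2 : PySem.Chars.find el.toList ['x', '^'] = ((u.length : Nat) : Int) := by
        rw [hs]
        have hres := find_at (u := u) (v := '^' :: v0) (p := ['x', '^'])
          hu hv (k := 0) (by decide) (Nat.zero_le _)
          (by rw [Nat.sub_zero, List.drop_left]; exact ⟨v0, rfl⟩)
        rw [hres]
        simp
      have hin2 : PySem.Str.isIn "x^" el = true := isIn_of_find hf2
      have hsp := split_pair el "x^" (by decide) u.length hf2
        (by rw [show ("x^" : String).toList.length = 2 from rfl, hdrop]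
            exact find_no_x (by decide) hv0)
      rw [show ("x^" : String).toList.length = 2 from rfl, htake, hdrop] at hsp
      simp only [slovarStep, hin1, hin2, Bool.false_eq_true, if_false, if_true, hsp,
        hget0, hget1]
      rw [if_neg hstar, if_pos (List.prefix_iff_eq_take.mpr rfl : ['^'] <+: '^' :: v0), List.tail_cons]
      by_cases h0 : u = []
      · subst h0; simp
      · rw [if_neg (mt (ofList_eq_empty_iff u).mp h0), if_neg h0]
  · by_cases hstar : ['*'] <:+ u
    · -- '*x' branch
      obtain ⟨u0, rfl⟩ := hstar
      have harr : (u0 ++ ['*']) ++ 'x' :: v = u0 ++ '*' :: 'x' :: v := by simp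
      have htake : el.toList.take u0.length = u0 := by rw [hs, harr]; exact List.take_left
      have hdrop : el.toList.drop (u0.length + 2) = v := by
        rw [hs, harr, List.drop_length_add_append]; simp
      have hab1 : PySem.Chars.find el.toList ['*', 'x', '^'] = -1 := by
        rw [hs]
        apply find_absent hu hv (k := 1) (by decide)
        rintro ⟨h1, hp⟩
        have hc := char_at_of_prefix (k := 2) (c := '^') (by decide) hp
        rw [show (u0 ++ ['*']).length - 1 + 2 = (u0 ++ ['*']).length + 1 by simp] at hc
        exact hcar (caret_of_char hc)
      have hab2 : PySem.Chars.find el.toList ['x', '^'] = -1 := by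
        rw [hs]
        apply find_absent hu hv (k := 0) (by decide)
        rintro ⟨h0, hp⟩
        have hc := char_at_of_prefix (k := 1) (c := '^') (by decide) hp
        rw [Nat.sub_zero] at hc
        exact hcar (caret_of_char hc)
      have hin1 : PySem.Str.isIn "*x^" el = false := isIn_false_of_find hab1
      have hin2 : PySem.Str.isIn "x^" el = false := isIn_false_of_find hab2
      have hf3 : PySem.Chars.find el.toList ['*', 'x'] = ((u0.length : Nat) : Int) := by
        rw [hs]
        have hres := find_at (u := u0 ++ ['*']) (v := v) (p := ['*', 'x'])
          hu hv (k := 1) (by decide) (by simp)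
          (by rw [show (u0 ++ ['*']).length - 1 = u0.length by simp, harr, List.drop_left]
              exact ⟨v, rfl⟩)
        rw [hres]
        simp
      have hin3 : PySem.Str.isIn "*x" el = true := isIn_of_find hf3
      have hsp := split_pair el "*x" (by decide) u0.length hf3
        (by rw [show ("*x" : String).toList.length = 2 from rfl, hdrop]
            exact find_no_x (by decide) hv)
      rw [show ("*x" : String).toList.length = 2 from rfl, htake, hdrop] at hsp
      simp only [slovarStep, hin1, hin2, hin3, Bool.false_eq_true, if_false, if_true,
        hsp, hget0, hget1]
      rw [if_pos (List.suffix_append u0 ['*']), if_neg hcar, List.dropLast_concat]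
      have hkey : (if String.ofList v = "" then ("1" : String) else String.ofList v) =
          if v = [] then "1" else String.ofList v := by
        by_cases h0 : v = []
        · subst h0; simp
        · rw [if_neg (mt (ofList_eq_empty_iff v).mp h0), if_neg h0]
      rw [hkey]
      by_cases h0 : u0 = []
      · subst h0; simp
      · rw [if_neg (mt (ofList_eq_empty_iff u0).mp h0), if_neg h0]
    · -- 'x' branch
      have htake : el.toList.take u.length = u := by rw [hs]; exact List.take_left
      have hdrop : el.toList.drop (u.length + 1) = v := by
        rw [hs, List.drop_length_add_append]; simp
      have hab1 : PySem.Chars.find el.toList ['*', 'x', '^'] = -1 := by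
        rw [hs]
        apply find_absent hu hv (k := 1) (by decide)
        rintro ⟨h1, hp⟩
        have hc := char_at_of_prefix (k := 0) (c := '*') (by decide) hp
        rw [Nat.add_zero] at hc
        exact hstar (star_of_char h1 hc)
      have hab2 : PySem.Chars.find el.toList ['x', '^'] = -1 := by
        rw [hs]
        apply find_absent hu hv (k := 0) (by decide)
        rintro ⟨h0, hp⟩
        have hc := char_at_of_prefix (k := 1) (c := '^') (by decide) hp
        rw [Nat.sub_zero] at hc
        exact hcar (caret_of_char hc)
      have hab3 : PySem.Chars.find el.toList ['*', 'x'] = -1 := by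
        rw [hs]
        apply find_absent hu hv (k := 1) (by decide)
        rintro ⟨h1, hp⟩
        have hc := char_at_of_prefix (k := 0) (c := '*') (by decide) hp
        rw [Nat.add_zero] at hc
        exact hstar (star_of_char h1 hc)
      have hin1 : PySem.Str.isIn "*x^" el = false := isIn_false_of_find hab1
      have hin2 : PySem.Str.isIn "x^" el = false := isIn_false_of_find hab2
      have hin3 : PySem.Str.isIn "*x" el = false := isIn_false_of_find hab3
      have hf4 : PySem.Chars.find el.toList ['x'] = ((u.length : Nat) : Int) := by
        rw [hs]
        exact find_at (u := u) (v := v) (p := ['x']) hu hv (k := 0) (by decide)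
          (Nat.zero_le _) (by rw [Nat.sub_zero, List.drop_left]; exact ⟨v, rfl⟩)
      have hin4 : PySem.Str.isIn "x" el = true := isIn_of_find hf4
      have hsp := split_pair el "x" (by decide) u.length hf4
        (by rw [show ("x" : String).toList.length = 1 from rfl, hdrop]
            exact find_no_x (by decide) hv)
      rw [show ("x" : String).toList.length = 1 from rfl, htake, hdrop] at hsp
      simp only [slovarStep, hin1, hin2, hin3, hin4, Bool.false_eq_true, if_false,
        if_true, hsp, hget0, hget1]
      rw [if_neg hstar, if_neg hcar]
      have hkey : (if String.ofList v = "" then ("1" : String) else String.ofList v) =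
          if v = [] then "1" else String.ofList v := by
        by_cases h0 : v = []
        · subst h0; simp
        · rw [if_neg (mt (ofList_eq_empty_iff v).mp h0), if_neg h0]
      rw [hkey]
      by_cases h0 : u = []
      · subst h0; simp
      · rw [if_neg (mt (ofList_eq_empty_iff u).mp h0), if_neg h0]

theorem bStep_decomp (d : PySem.Dict String String) (el : String) (u v : List Char)
    (hs : el.toList = u ++ 'x' :: v) (hu : 'x' ∉ u) (hv : 'x' ∉ v) :
    slovarAltStep d el =
      d.insert
        (if ['^'] <+: v then String.ofList v.tail else if v = [] then "1" else String.ofList v)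
        (if (if ['*'] <:+ u then u.dropLast else u) = [] then "1"
         else String.ofList (if ['*'] <:+ u then u.dropLast else u)) := by
  have hfx : PySem.Chars.find el.toList ['x'] = ((u.length : Nat) : Int) := by
    rw [hs]
    exact find_at (u := u) (v := v) (p := ['x']) hu hv (k := 0) (by decide) (Nat.zero_le _)
      (by rw [Nat.sub_zero, List.drop_left]; exact ⟨v, rfl⟩)
  have hfind : PySem.Str.find el "x" = ((u.length : Nat) : Int) := by
    rw [PySem.Str.find_eq]; exact hfx
  have hcoeff : (PySem.Str.slice el none (some ((u.length : Nat) : Int))).toList = u := by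
    rw [PySem.Str.toList_slice, PySem.Chars.slice_eq_listSlice, PySem.List.slice_to_natCast,
      hs, List.take_left]
  have hexp : (PySem.Str.slice el (some (((u.length : Nat) : Int) + 1)) none).toList = v := by
    rw [show ((u.length : Nat) : Int) + 1 = ((u.length + 1 : Nat) : Int) by push_cast; ring,
      PySem.Str.toList_slice, PySem.Chars.slice_eq_listSlice, PySem.List.slice_from_natCast,
      hs, List.drop_length_add_append]
    rfl
  simp only [slovarAltStep, hfind]
  rw [if_neg (by omega : ¬ (((u.length : Nat) : Int) < 0))]
  have hval : (if PySem.Str.endswith (PySem.Str.slice el none (some ((u.length : Nat) : Int))) "*" = true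
        then PySem.Str.slice (PySem.Str.slice el none (some ((u.length : Nat) : Int))) none (some (-1))
        else PySem.Str.slice el none (some ((u.length : Nat) : Int))).toList =
      (if ['*'] <:+ u then u.dropLast else u) := by
    by_cases hstar : ['*'] <:+ u
    · rw [if_pos hstar, if_pos (by
        rw [PySem.Str.endswith_eq]
        exact (PySem.Chars.endswith_iff _ _).mpr (by rw [hcoeff]; exact hstar))]
      rw [PySem.Str.slice_to_neg_one, hcoeff]
    · rw [if_neg hstar, if_neg (by
        rw [PySem.Str.endswith_eq]
        intro hc
        exact hstar (by rw [← hcoeff]; exact (PySem.Chars.endswith_iff _ _).mp hc))]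
      exact hcoeff
  have hkey : (if PySem.Str.startswith (PySem.Str.slice el (some (((u.length : Nat) : Int) + 1)) none) "^" = true
        then PySem.Str.slice (PySem.Str.slice el (some (((u.length : Nat) : Int) + 1)) none) (some 1) none
        else if PySem.Str.slice el (some (((u.length : Nat) : Int) + 1)) none = "" then "1"
        else PySem.Str.slice el (some (((u.length : Nat) : Int) + 1)) none) =
      (if ['^'] <+: v then String.ofList v.tail else if v = [] then "1" else String.ofList v) := by
    by_cases hcar : ['^'] <+: v
    · rw [if_pos hcar, if_pos (by
        rw [PySem.Str.startswith_eq]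
        exact (PySem.Chars.startswith_iff _ _).mpr (by rw [hexp]; exact hcar))]
      rw [← String.toList_inj, PySem.Str.toList_slice, PySem.Chars.slice_eq_listSlice,
        PySem.List.slice_from_one, hexp, String.toList_ofList]
    · rw [if_neg hcar, if_neg (by
        rw [PySem.Str.startswith_eq]
        intro hc
        exact hcar (by rw [← hexp]; exact (PySem.Chars.startswith_iff _ _).mp hc))]
      by_cases h0 : v = []
      · rw [if_pos h0, if_pos (by rw [← String.toList_inj, hexp, h0]; rfl)]
      · rw [if_neg h0, if_neg (by
          intro hc
          exact h0 (by rw [← hexp, hc]; rfl))]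
        rw [← String.toList_inj, hexp, String.toList_ofList]
  rw [hkey]
  generalize hgen : (if PySem.Str.endswith (PySem.Str.slice el none (some ((u.length : Nat) : Int))) "*" = true
        then PySem.Str.slice (PySem.Str.slice el none (some ((u.length : Nat) : Int))) none (some (-1))
        else PySem.Str.slice el none (some ((u.length : Nat) : Int))) = C
  rw [hgen] at hval
  by_cases h0 : (if ['*'] <:+ u then u.dropLast else u) = []
  · have hC : C = "" := by rw [← String.toList_inj, hval, h0]; rfl
    rw [if_pos h0, if_pos hC]
  · have hC : C = String.ofList (if ['*'] <:+ u then u.dropLast else u) := by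
      rw [← String.toList_inj, hval, String.toList_ofList]
    have hC' : C ≠ "" := by
      rw [hC]
      exact mt (ofList_eq_empty_iff _).mp h0
    rw [if_neg h0, if_neg hC', hC]

theorem step_eq (d : PySem.Dict String String) (el : String)
    (h : el.toList.count 'x' ≤ 1) : slovarStep d el = slovarAltStep d el := by
  by_cases hx : 'x' ∈ el.toList
  · have hc1 : el.toList.count 'x' = 1 := by
      have := List.count_pos_iff.mpr hx
      omega
    obtain ⟨u, v, hsv, hu, hv⟩ := count_one_decomp hc1
    rw [aStep_decomp d el u v hsv hu hv, bStep_decomp d el u v hsv hu hv]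
  · rw [aStep_noX d el hx, bStep_noX d el hx]

-- ===== VERDICT (by name: the statement is the Claim_ definition above) =====
theorem slovar_spec : Claim_equal_slovar := by
  intro mn _ hpre
  show slovar mn = slovar_alt mn
  unfold slovar slovar_alt
  rw [PySem.List.foldl_congr_mem mn slovarStep slovarAltStep PySem.Dict.empty
    (fun acc x hxm => step_eq acc x (hpre x hxm))]
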